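-- pv_equiv track=rewrite | github.com/fengz10/ICN_SCM | SimMain.py | GetIndexOfMax
-- ===== SOURCE A (Python) =====
-- def GetIndexOfMax(doubleDict):
--     if not doubleDict:
--         return (-1, -1)
--     i = j = -1
--     currentMax = -1      # initial value
--     for index in doubleDict:
--         if not doubleDict[index]:
--             continue
--
--         jTemp = max(doubleDict[index], key = doubleDict[index].get)
--         vMax = doubleDict[index][jTemp]
--
--         if (vMax > currentMax):
--             i = index
--             j = jTemp
--             currentMax = vMax
--
-- #        vMax = max(doubleDict[index].keys())
-- #        if (vMax > currentMax):
-- #            j = k for (k,v) in doubleDict[index].items() if v == vMax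
-- #            i = index
-- #            currentMax = vMax
--     return i, j
-- ===== SOURCE B (Python) =====
-- def GetIndexOfMax(doubleDict):
--     # Staged passes instead of a running-max sweep: flatten all entries to
--     # (i, k, v) triples, take the global max value, then return the first
--     # triple attaining it (values <= -1 never qualify, matching the sentinel).
--     flat = [(i, k, doubleDict[i][k]) for i in doubleDict for k in doubleDict[i]]
--     if not flat:
--         return (-1, -1)
--     m = max(v for _, _, v in flat)
--     if m <= -1:
--         return (-1, -1)
--     for i, k, v in flat:
--         if v == m:
--             return (i, k)
-- ===== Notes on version B (the rewrite author's own statement) =====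
-- stated objective: alternative
-- what changed: Replaced A's per-row max(key=get) reduction plus running-max compare by three staged passes: flatten all entries into (i, k, v) triples, compute the global max value, then return the first triple attaining it (with the -1 sentinel falling out of the m <= -1 test).
import Mathlib
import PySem

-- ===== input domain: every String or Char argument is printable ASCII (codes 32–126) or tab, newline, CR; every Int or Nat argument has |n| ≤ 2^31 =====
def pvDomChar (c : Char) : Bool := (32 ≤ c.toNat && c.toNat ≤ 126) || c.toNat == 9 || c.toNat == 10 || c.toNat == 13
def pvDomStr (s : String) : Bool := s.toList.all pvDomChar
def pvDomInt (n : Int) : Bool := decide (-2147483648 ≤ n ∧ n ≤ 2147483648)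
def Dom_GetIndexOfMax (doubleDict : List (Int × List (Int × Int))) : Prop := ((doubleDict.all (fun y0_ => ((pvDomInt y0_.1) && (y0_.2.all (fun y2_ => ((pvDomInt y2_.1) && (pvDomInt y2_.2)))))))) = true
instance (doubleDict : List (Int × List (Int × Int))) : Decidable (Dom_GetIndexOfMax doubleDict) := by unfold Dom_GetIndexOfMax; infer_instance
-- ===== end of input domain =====

-- B replaces A's per-row max(key=get) reduction + running-max compare by three
-- staged passes over the flattened entries: flatten, global max, first attainer
-- (alternative decomposition; same cost).


-- ===== PORT A =====
-- for index in doubleDict: if row nonempty, jTemp = max(row, key=row.get);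
-- then compare row[jTemp] against the running currentMax.
def GetIndexOfMax (doubleDict : List (Int × List (Int × Int))) : Int × Int :=
  if doubleDict = [] then (-1, -1)
  else
    let st := doubleDict.foldl (fun (s : Int × Int × Int) (kv : Int × List (Int × Int)) =>
      let inner : List (Int × Int) := PySem.Dict.getD (PySem.Dict.mk doubleDict) kv.1 []
      if inner = [] then s
      else
        match PySem.List.max? (inner.map (·.1)) (fun k => PySem.Dict.getD (PySem.Dict.mk inner) k 0) with
        | none => s  -- unreachable: inner ≠ []
        | some jTemp =>
          let vMax := PySem.Dict.getD (PySem.Dict.mk inner) jTemp 0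
          if s.2.2 < vMax then (kv.1, jTemp, vMax) else s) (-1, -1, -1)
    (st.1, st.2.1)

-- ===== PORT B =====
-- flat = [(i, k, d[i][k]) for i in d for k in d[i]]; if no entries → (-1, -1);
-- m = max of the values; if m <= -1 → (-1, -1); else first triple with v == m.
def GetIndexOfMax_alt (doubleDict : List (Int × List (Int × Int))) : Int × Int :=
  let flat : List (Int × Int × Int) := doubleDict.flatMap (fun kv =>
    let inner : List (Int × Int) := PySem.Dict.getD (PySem.Dict.mk doubleDict) kv.1 []
    inner.map (fun p => (kv.1, p.1, PySem.Dict.getD (PySem.Dict.mk inner) p.1 0)))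
  if flat = [] then (-1, -1)
  else
    match PySem.List.max? (flat.map (fun t => t.2.2)) id with
    | none => (-1, -1)  -- unreachable: flat ≠ []
    | some m =>
      if m ≤ -1 then (-1, -1)
      else
        match flat.find? (fun t => t.2.2 == m) with
        | some t => (t.1, t.2.1)
        | none => (-1, -1)  -- unreachable: m is attained

-- ===== PRECONDITION & SPEC =====
def Spec_GetIndexOfMax (doubleDict : List (Int × List (Int × Int))) (out : Int × Int) : Prop := out = GetIndexOfMax_alt doubleDict
instance (doubleDict : List (Int × List (Int × Int))) (out : Int × Int) : Decidable (Spec_GetIndexOfMax doubleDict out) := by unfold Spec_GetIndexOfMax; infer_instance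

-- ===== CLAIM (what is proved, stated in full; the proofs are below) =====
def Claim_equal_GetIndexOfMax : Prop := ∀ (doubleDict : List (Int × List (Int × Int))), Dom_GetIndexOfMax doubleDict → Spec_GetIndexOfMax doubleDict (GetIndexOfMax doubleDict)

-- ===== LEMMAS AND PROOFS =====

-- the flat step function on triples (i, k, v)
def pvStep (s : Int × Int × Int) (t : Int × Int × Int) : Int × Int × Int :=
  if s.2.2 < t.2.2 then t else s

-- running first-argmax of g over b :: t (the shape of Python's max(..., key=g))
def runMax (g : Int → Int) (t : List Int) (b : Int) : Int :=
  t.foldl (fun a y => if g a < g y then y else a) b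

theorem max?_cons (g : Int → Int) (t : List Int) (b : Int) :
    PySem.List.max? (b :: t) g = some (runMax g t b) := by
  unfold PySem.List.max? runMax
  simp only [List.foldl_cons]
  induction t generalizing b with
  | nil => rfl
  | cons y t ih =>
    simp only [List.foldl_cons]
    by_cases h : g b < g y <;> simp [h, ih]

theorem runMax_id (t : List Int) (b : Int) : runMax id t b = t.foldl max b := by
  induction t generalizing b with
  | nil => rfl
  | cons y t ih =>
    unfold runMax at *
    simp only [List.foldl_cons, id] at *
    rw [ih]
    congr 1
    omega

theorem le_foldl_max (t : List Int) (b : Int) : b ≤ t.foldl max b := by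
  induction t generalizing b with
  | nil => simp
  | cons y t ih =>
    simp only [List.foldl_cons]
    exact le_trans (le_max_left b y) (ih (max b y))

theorem foldl_max_comm (t : List Int) (a b : Int) :
    t.foldl max (max a b) = max (t.foldl max a) b := by
  induction t generalizing a with
  | nil => rfl
  | cons y t ih =>
    simp only [List.foldl_cons]
    have h : max (max a b) y = max (max a y) b := by omega
    rw [h, ih]

theorem foldl_max_mem (t : List Int) (b : Int) :
    t.foldl max b = b ∨ t.foldl max b ∈ t := by
  induction t generalizing b with
  | nil => left; rfl
  | cons y t ih =>
    simp only [List.foldl_cons]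
    rcases ih (max b y) with h | h
    · rcases max_choice b y with hm | hm
      · left; rw [h, hm]
      · right; rw [h, hm]; exact List.mem_cons_self
    · right; exact List.mem_cons_of_mem _ h

-- characterisation of the flat running-max fold
theorem foldl_pvStep_eq (L : List (Int × Int × Int)) : ∀ (i j m : Int),
    L.foldl pvStep (i, j, m) =
      (let M := (L.map (fun t => t.2.2)).foldl max m
       if M ≤ m then (i, j, m)
       else match L.find? (fun t => t.2.2 == M) with
            | some t => t
            | none => (i, j, m)) := by
  induction L with
  | nil => intro i j m; simp
  | cons t L ih =>
    intro i j m
    obtain ⟨a, b, v⟩ := t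
    simp only [List.foldl_cons, List.map_cons, pvStep]
    by_cases hv : m < v
    · simp only [hv, if_true]
      rw [ih a b v]
      have hM : (L.map (fun t => t.2.2)).foldl max (max m v) = (L.map (fun t => t.2.2)).foldl max v := by
        congr 1; omega
      set M := (L.map (fun t => t.2.2)).foldl max v with hMdef
      have hvM : v ≤ M := le_foldl_max _ _
      have hmM : ¬ M ≤ m := by omega
      simp only [hM, hmM, if_false]
      by_cases hvm : v = M
      · simp [hvm]
      · have hMv : ¬ M ≤ v := by omega
        have hpt : ((fun t : Int × Int × Int => t.2.2 == M) (a, b, v)) = false := by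
          simp [hvm]
        simp only [List.find?_cons, hpt, hMv, if_false]
        -- the none branch is unreachable: M > v so M is attained in L
        rcases foldl_max_mem (L.map (fun t => t.2.2)) v with h | h
        · omega
        · rcases List.mem_map.mp h with ⟨u, hu, huv⟩
          have : (L.find? (fun t => t.2.2 == M)).isSome := by
            rw [List.find?_isSome]
            exact ⟨u, hu, by simp [huv, ← hMdef]⟩
          cases hfind : L.find? (fun t => t.2.2 == M) with
          | none => rw [hfind] at this; simp at this
          | some w => rfl
    · simp only [hv, if_false]
      rw [ih i j m]
      have hmv : max m v = m := by omega
      simp only [hmv]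
      set M := (L.map (fun t => t.2.2)).foldl max m with hMdef
      by_cases hMm : M ≤ m
      · simp [hMm]
      · have hvM : v ≠ M := by
          have := le_foldl_max (L.map (fun t => t.2.2)) m
          omega
        have hpt : ((fun t : Int × Int × Int => t.2.2 == M) (a, b, v)) = false := by
          simp [hvM]
        simp only [hMm, if_false, List.find?_cons, hpt]

-- A's per-row reduce-then-compare step equals the flat fold over the row's triples
theorem strict_fold_aux (idx i j m : Int) (g : Int → Int) (t : List Int) : ∀ b : Int,
    t.foldl (fun (s : Int × Int × Int) k => if s.2.2 < g k then (idx, k, g k) else s)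
      (if m < g b then (idx, b, g b) else (i, j, m))
    = (if m < g (runMax g t b) then (idx, runMax g t b, g (runMax g t b)) else (i, j, m)) := by
  induction t with
  | nil => intro b; rfl
  | cons y t ih =>
    intro b
    simp only [List.foldl_cons, runMax, List.foldl_cons] at *
    by_cases hb : m < g b
    · by_cases hy : g b < g y
      · have hym : m < g y := lt_trans hb hy
        simpa [hb, hy, hym] using ih y
      · simpa [hb, hy] using ih b
    · by_cases hy : m < g y
      · have hby : g b < g y := lt_of_le_of_lt (not_lt.mp hb) hy
        simpa [hb, hy, hby] using ih y
      · by_cases hby : g b < g y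
        · simpa [hb, hy, hby] using ih y
        · simpa [hb, hy, hby] using ih b

theorem inner_step (idx i j m : Int) (g : Int → Int) (ks : List Int) :
    ks.foldl (fun (s : Int × Int × Int) k => if s.2.2 < g k then (idx, k, g k) else s) (i, j, m)
    = (match PySem.List.max? ks g with
      | none => (i, j, m)
      | some jT => if m < g jT then (idx, jT, g jT) else (i, j, m)) := by
  cases ks with
  | nil => rfl
  | cons k t =>
    rw [max?_cons]
    simpa using strict_fold_aux idx i j m g t k

theorem step_eq (inner : List (Int × Int)) (idx : Int) (s : Int × Int × Int) :
    (if inner = [] then s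
     else
       match PySem.List.max? (inner.map (·.1)) (fun k => PySem.Dict.getD (PySem.Dict.mk inner) k 0) with
       | none => s
       | some jTemp =>
         if s.2.2 < PySem.Dict.getD (PySem.Dict.mk inner) jTemp 0 then
           (idx, jTemp, PySem.Dict.getD (PySem.Dict.mk inner) jTemp 0)
         else s)
    = (inner.map (fun p => (idx, p.1, PySem.Dict.getD (PySem.Dict.mk inner) p.1 0))).foldl pvStep s := by
  obtain ⟨i, j, m⟩ := s
  have hmap : (inner.map (fun p => (idx, p.1, PySem.Dict.getD (PySem.Dict.mk inner) p.1 0))).foldl pvStep (i, j, m)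
      = (inner.map (·.1)).foldl (fun (t : Int × Int × Int) (k : Int) =>
        if t.2.2 < PySem.Dict.getD (PySem.Dict.mk inner) k 0 then
          (idx, k, PySem.Dict.getD (PySem.Dict.mk inner) k 0)
        else t) (i, j, m) := by
    rw [List.foldl_map, List.foldl_map]
    rfl
  rw [hmap, inner_step idx i j m (fun k => PySem.Dict.getD (PySem.Dict.mk inner) k 0) (inner.map (·.1))]
  by_cases hi : inner = []
  · subst hi; rfl
  · simp [hi]

theorem foldl_flatMap' {α β : Type} (g : β → List α) (f : (Int × Int × Int) → α → (Int × Int × Int)) :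
    ∀ (L : List β) (s : Int × Int × Int),
    (L.flatMap g).foldl f s = L.foldl (fun s x => (g x).foldl f s) s := by
  intro L
  induction L with
  | nil => intro s; rfl
  | cons x L ih =>
    intro s
    simp only [List.flatMap_cons, List.foldl_append, List.foldl_cons, ih]

-- ===== VERDICT (by name: the statement is the Claim_ definition above) =====
theorem GetIndexOfMax_spec : Claim_equal_GetIndexOfMax := by
  intro d _
  unfold Spec_GetIndexOfMax GetIndexOfMax GetIndexOfMax_alt
  simp only []
  set flat : List (Int × Int × Int) := d.flatMap (fun kv =>
    (PySem.Dict.getD (PySem.Dict.mk d) kv.1 []).map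
      (fun p => (kv.1, p.1, PySem.Dict.getD (PySem.Dict.mk (PySem.Dict.getD (PySem.Dict.mk d) kv.1 [])) p.1 0))) with hflat
  -- A's fold equals the flat fold
  have hA : d.foldl (fun (s : Int × Int × Int) (kv : Int × List (Int × Int)) =>
      let inner : List (Int × Int) := PySem.Dict.getD (PySem.Dict.mk d) kv.1 []
      if inner = [] then s
      else
        match PySem.List.max? (inner.map (·.1)) (fun k => PySem.Dict.getD (PySem.Dict.mk inner) k 0) with
        | none => s
        | some jTemp =>
          let vMax := PySem.Dict.getD (PySem.Dict.mk inner) jTemp 0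
          if s.2.2 < vMax then (kv.1, jTemp, vMax) else s) (-1, -1, -1)
      = flat.foldl pvStep (-1, -1, -1) := by
    rw [hflat, foldl_flatMap']
    have hfun : (fun (s : Int × Int × Int) (kv : Int × List (Int × Int)) =>
        let inner : List (Int × Int) := PySem.Dict.getD (PySem.Dict.mk d) kv.1 []
        if inner = [] then s
        else
          match PySem.List.max? (inner.map (·.1)) (fun k => PySem.Dict.getD (PySem.Dict.mk inner) k 0) with
          | none => s
          | some jTemp =>
            let vMax := PySem.Dict.getD (PySem.Dict.mk inner) jTemp 0
            if s.2.2 < vMax then (kv.1, jTemp, vMax) else s)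
        = (fun (s : Int × Int × Int) (kv : Int × List (Int × Int)) =>
        ((PySem.Dict.getD (PySem.Dict.mk d) kv.1 []).map
          (fun p => (kv.1, p.1, PySem.Dict.getD (PySem.Dict.mk (PySem.Dict.getD (PySem.Dict.mk d) kv.1 [])) p.1 0))).foldl pvStep s) := by
      funext s kv
      exact step_eq (PySem.Dict.getD (PySem.Dict.mk d) kv.1 []) kv.1 s
    rw [hfun]
  by_cases hd : d = []
  · subst hd; rfl
  · simp only [hd, if_false, hA]
    rw [foldl_pvStep_eq]
    cases hf : flat with
    | nil => simp
    | cons t ts =>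
      simp only [List.map_cons]
      rw [max?_cons id (ts.map (fun t => t.2.2)) t.2.2, runMax_id]
      simp only [List.foldl_cons]
      set M' := (ts.map (fun t => t.2.2)).foldl max t.2.2 with hM'
      have hcomm : (ts.map (fun t => t.2.2)).foldl max (max (-1) t.2.2)
          = max M' (-1) := by
        have h : max (-1 : Int) t.2.2 = max t.2.2 (-1) := by omega
        rw [h, foldl_max_comm]
      rw [hcomm]
      by_cases hm : M' ≤ -1
      · have h1 : max M' (-1 : Int) ≤ -1 := by omega
        simp [hm]
      · have h2 : max M' (-1 : Int) = M' := by omega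
        have h3 : ¬ max M' (-1 : Int) ≤ (-1 : Int) := by omega
        simp only [h2, hm, if_false]
        cases hfind : (t :: ts).find? (fun u => u.2.2 == M') with
        | none => rfl
        | some u => rfl
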